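-- pv_equiv track=rewrite | github.com/pypi-data/pypi-mirror-402 | packages/bsv-sdk/bsv_sdk-2.0.0b1.tar.gz/bsv_sdk-2.0.0b1/bsv/wallet/wallet_impl.py | _select_best_pair
-- ===== SOURCE A (Python) =====
-- from typing import Any, Dict, List, Optional
--
-- def _select_best_pair(utxos: list[dict], need: int) -> Optional[tuple]:
--     """Heuristic 2: try best pair (limit search space)."""
--     pair = None
--     best_sum = float("inf")
--     limited = utxos[:50]
--
--     for i in range(len(limited)):
--         vi = int(limited[i].get("satoshis", 0))
--         if vi >= need:
--             pair = (limited[i],)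
--             break
--         for j in range(i + 1, len(limited)):
--             vj = int(limited[j].get("satoshis", 0))
--             s = vi + vj
--             if s >= need and s < best_sum:
--                 best_sum = s
--                 pair = (limited[i], limited[j])
--
--     return pair
-- ===== SOURCE B (Python) =====
-- from typing import Optional
--
--
-- def _tail_candidates(pv: list, need: int) -> list:
--     """All (sum, ui, uj) for pairs i<j of pv (list of (utxo, value)) with sum >= need."""
--     if not pv:
--         return []
--     (u0, v0), rest = pv[0], pv[1:]
--     here = [(v0 + v, u0, u) for (u, v) in rest if v0 + v >= need]
--     return here + _tail_candidates(rest, need)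
--
--
-- def _select_best_pair(utxos: list, need: int) -> Optional[tuple]:
--     """Staged: precompute values, scan for a single, else pick min over an explicit candidate list."""
--     limited = utxos[:50]
--     pv = [(u, int(u.get("satoshis", 0))) for u in limited]
--     for u, v in pv:
--         if v >= need:
--             return (u,)
--     cands = _tail_candidates(pv, need)
--     if not cands:
--         return None
--     best = min(cands, key=lambda c: c[0])  # Python min: first minimal wins, like A's strict '<'
--     return (best[1], best[2])
-- ===== Notes on version B (the rewrite author's own statement) =====
-- stated objective: alternative
-- what changed: B replaces A's fused nested accumulator loop (with break and running best_sum) by staged passes: precompute (utxo, value) pairs once, a plain scan returning the first single sufficient UTXO, a recursively built explicit list of all qualifying (sum, ui, uj) pair candidates, and a single min(key=sum) call (first minimal wins, matching A's strict-< update).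
import Mathlib
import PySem

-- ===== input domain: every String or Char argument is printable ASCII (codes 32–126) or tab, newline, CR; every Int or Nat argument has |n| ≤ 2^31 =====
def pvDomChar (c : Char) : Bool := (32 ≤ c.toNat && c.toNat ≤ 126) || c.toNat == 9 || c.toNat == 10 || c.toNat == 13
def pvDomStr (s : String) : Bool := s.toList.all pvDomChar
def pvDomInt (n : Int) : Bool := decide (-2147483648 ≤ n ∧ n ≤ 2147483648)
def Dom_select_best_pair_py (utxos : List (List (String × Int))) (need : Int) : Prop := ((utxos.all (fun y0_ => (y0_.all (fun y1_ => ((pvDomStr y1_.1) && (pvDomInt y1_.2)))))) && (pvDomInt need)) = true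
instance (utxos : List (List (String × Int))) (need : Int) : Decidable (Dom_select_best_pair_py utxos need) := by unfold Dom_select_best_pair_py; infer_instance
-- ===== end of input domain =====

-- B replaces A's fused nested accumulator loop (break + running best_sum) by staged passes:
-- precomputed (utxo, value) pairs, a scan for a single, an explicit recursive candidate list,
-- and one min-by-sum call (alternative decomposition, same cost).


-- u.get("satoshis", 0): first-match association-list lookup with default (exact for a Python
-- dict: duplicate keys cannot arise, first match is the dict's value); int() on an int is identity
def pvSat (u : List (String × Int)) : Int :=
  ((u.find? (fun kv => kv.1 == "satoshis")).map (·.2)).getD 0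

-- ===== PORT A =====
-- inner 'for j' loop of A: state is (pair, best_sum), best_sum none = float('inf')
def pvInnerA (need : Int) (ui : List (String × Int)) (vi : Int)
    (rest : List (List (String × Int)))
    (st : Option (List (List (String × Int))) × Option Int) :
    Option (List (List (String × Int))) × Option Int :=
  rest.foldl (fun st uj =>
    let s := vi + pvSat uj
    if need ≤ s ∧ (∀ b ∈ st.2, s < b) then (some [ui, uj], some s) else st) st

-- outer 'for i' loop of A, with the break on a sufficient single
def pvOuterA (need : Int) :
    List (List (String × Int)) →
    Option (List (List (String × Int))) × Option Int →
    Option (List (List (String × Int)))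
  | [], st => st.1
  | u :: rest, st =>
    let vi := pvSat u
    if need ≤ vi then some [u]
    else pvOuterA need rest (pvInnerA need u vi rest st)

def select_best_pair_py (utxos : List (List (String × Int))) (need : Int) :
    Option (List (List (String × Int))) :=
  pvOuterA need (PySem.List.slice utxos none (some 50)) (none, none)

-- ===== PORT B =====
-- _tail_candidates: all (sum, ui, uj) over pairs i < j with sum >= need, built recursively
def pvTailCands (need : Int) :
    List (List (String × Int) × Int) →
    List (Int × List (String × Int) × List (String × Int))
  | [] => []
  | (u0, v0) :: rest =>
    rest.filterMap (fun uv =>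
      if need ≤ v0 + uv.2 then some (v0 + uv.2, u0, uv.1) else none)
    ++ pvTailCands need rest

def select_best_pair_py_alt (utxos : List (List (String × Int))) (need : Int) :
    Option (List (List (String × Int))) :=
  let limited := PySem.List.slice utxos none (some 50)
  let pv := limited.map (fun u => (u, pvSat u))
  match pv.find? (fun uv => need ≤ uv.2) with
  | some uv => some [uv.1]
  | none =>
    (PySem.List.min? (pvTailCands need pv) (·.1)).map (fun c => [c.2.1, c.2.2])

-- ===== PRECONDITION & SPEC =====
def Spec_select_best_pair_py (utxos : List (List (String × Int))) (need : Int) (out : Option (List (List (String × Int)))) : Prop := out = select_best_pair_py_alt utxos need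
instance (utxos : List (List (String × Int))) (need : Int) (out : Option (List (List (String × Int)))) : Decidable (Spec_select_best_pair_py utxos need out) := by unfold Spec_select_best_pair_py; infer_instance

-- ===== CLAIM (what is proved, stated in full; the proofs are below) =====
def Claim_equal_select_best_pair_py : Prop := ∀ (utxos : List (List (String × Int))) (need : Int), Dom_select_best_pair_py utxos need → Spec_select_best_pair_py utxos need (select_best_pair_py utxos need)

-- ===== LEMMAS AND PROOFS =====

-- the step of PySem.List.min? with key (·.1), specialised to candidates
def pvMinStep (acc : Option (Int × List (String × Int) × List (String × Int)))
    (c : Int × List (String × Int) × List (String × Int)) :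
    Option (Int × List (String × Int) × List (String × Int)) :=
  match acc with
  | none => some c
  | some m => if c.1 < m.1 then some c else some m

theorem min?_eq_foldl (xs : List (Int × List (String × Int) × List (String × Int))) :
    PySem.List.min? xs (·.1) = xs.foldl pvMinStep none := by
  simp only [PySem.List.min?]
  congr 1
  funext acc c
  cases acc <;> rfl

-- A-state read off from a min? accumulator
def pvStOf (b : Option (Int × List (String × Int) × List (String × Int))) :
    Option (List (List (String × Int))) × Option Int :=
  (b.map (fun c => [c.2.1, c.2.2]), b.map (·.1))

-- A's inner loop = min?-fold over the filtered candidate list of this row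
theorem pvInner_minFold (need : Int) (ui : List (String × Int)) (vi : Int)
    (rest : List (List (String × Int)))
    (b : Option (Int × List (String × Int) × List (String × Int))) :
    pvInnerA need ui vi rest (pvStOf b) =
      pvStOf ((rest.filterMap (fun uj =>
        if need ≤ vi + pvSat uj then some (vi + pvSat uj, ui, uj) else none)).foldl
          pvMinStep b) := by
  induction rest generalizing b with
  | nil => rfl
  | cons uj rest ih =>
    simp only [pvInnerA, List.foldl_cons, List.filterMap_cons]
    by_cases hs : need ≤ vi + pvSat uj
    · rw [if_pos hs]
      cases b with
      | none =>
        have hc : need ≤ vi + pvSat uj ∧ (∀ x ∈ (pvStOf none).2, vi + pvSat uj < x) := by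
          exact ⟨hs, by simp [pvStOf]⟩
        rw [if_pos hc]
        simpa [pvInnerA, pvMinStep] using ih (some (vi + pvSat uj, ui, uj))
      | some m =>
        by_cases hlt : vi + pvSat uj < m.1
        · have hc : need ≤ vi + pvSat uj ∧ (∀ x ∈ (pvStOf (some m)).2, vi + pvSat uj < x) := by
            exact ⟨hs, by simpa [pvStOf] using hlt⟩
          rw [if_pos hc]
          simpa [pvInnerA, pvMinStep, hlt] using ih (some (vi + pvSat uj, ui, uj))
        · have hc : ¬ (need ≤ vi + pvSat uj ∧ (∀ x ∈ (pvStOf (some m)).2, vi + pvSat uj < x)) := by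
            intro h; exact hlt (by simpa [pvStOf] using h.2)
          rw [if_neg hc]
          simpa [pvInnerA, pvMinStep, hlt] using ih (some m)
    · rw [if_neg hs]
      have hc : ¬ (need ≤ vi + pvSat uj ∧ (∀ x ∈ (pvStOf b).2, vi + pvSat uj < x)) := by
        intro h; exact hs h.1
      rw [if_neg hc]
      simpa [pvInnerA] using ih b

-- candidate list of the whole (unsliced-state) scan, as pvTailCands sees it
theorem pvTailCands_map (need : Int) (l : List (List (String × Int))) :
    pvTailCands need (l.map (fun u => (u, pvSat u))) =
      match l with
      | [] => []
      | u :: rest =>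
        rest.filterMap (fun uj =>
          if need ≤ pvSat u + pvSat uj then some (pvSat u + pvSat uj, u, uj) else none)
        ++ pvTailCands need (rest.map (fun u => (u, pvSat u))) := by
  cases l with
  | nil => rfl
  | cons u rest =>
    simp only [List.map_cons, pvTailCands, List.filterMap_map]
    rfl

-- if no element covers the need, A's loop is the min?-fold over all candidates
theorem pvOuter_minFold (need : Int) (l : List (List (String × Int)))
    (hns : ∀ u ∈ l, ¬ need ≤ pvSat u)
    (b : Option (Int × List (String × Int) × List (String × Int))) :
    pvOuterA need l (pvStOf b) =
      ((pvTailCands need (l.map (fun u => (u, pvSat u)))).foldl pvMinStep b).map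
        (fun c => [c.2.1, c.2.2]) := by
  induction l generalizing b with
  | nil => rfl
  | cons u rest ih =>
    have hu := hns u (by simp)
    rw [pvTailCands_map]
    simp only [pvOuterA, if_neg hu, List.foldl_append]
    rw [pvInner_minFold]
    exact ih (fun v hv => hns v (by simp [hv])) _

-- if find? finds a pair with sufficient value, A returns that single whatever state it carries
theorem pvOuter_single (need : Int) (l : List (List (String × Int)))
    (uv : List (String × Int) × Int)
    (hf : (l.map (fun u => (u, pvSat u))).find? (fun uv => need ≤ uv.2) = some uv)
    (st : Option (List (List (String × Int))) × Option Int) :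
    pvOuterA need l st = some [uv.1] := by
  induction l generalizing st with
  | nil => cases hf
  | cons v rest ih =>
    by_cases hv : need ≤ pvSat v
    · simp only [List.map_cons, List.find?_cons, decide_eq_true hv] at hf
      cases hf
      simp [pvOuterA, hv]
    · simp only [List.map_cons, List.find?_cons, decide_eq_false hv] at hf
      simp only [pvOuterA, if_neg hv]
      exact ih hf _

theorem pvFind_none (need : Int) (l : List (List (String × Int)))
    (hf : (l.map (fun u => (u, pvSat u))).find? (fun uv => need ≤ uv.2) = none) :
    ∀ u ∈ l, ¬ need ≤ pvSat u := by
  intro u hu hle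
  have : (u, pvSat u) ∈ l.map (fun u => (u, pvSat u)) := List.mem_map_of_mem hu
  have := List.find?_eq_none.mp hf _ this
  simp [hle] at this

-- ===== VERDICT (by name: the statement is the Claim_ definition above) =====
theorem select_best_pair_py_spec : Claim_equal_select_best_pair_py := by
  intro utxos need _
  unfold Spec_select_best_pair_py select_best_pair_py select_best_pair_py_alt
  dsimp only
  cases hf : ((PySem.List.slice utxos none (some 50)).map (fun u => (u, pvSat u))).find?
      (fun uv => need ≤ uv.2) with
  | some uv =>
    exact pvOuter_single need _ uv hf _
  | none =>
    rw [min?_eq_foldl]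
    exact pvOuter_minFold need _ (pvFind_none need _ hf) none
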